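-- pv_equiv track=rewrite | github.com/mongodb-industry-solutions/kehrnel | src/kehrnel/engine/strategies/openehr/rps_dual/query/raw_aql_compat.py | _scan_boundaries
-- ===== SOURCE A (Python) =====
-- from typing import Any, Dict, List, Sequence
--
-- def _scan_boundaries(text: str) -> Sequence[tuple[int, str]]:
--     keywords = ("SELECT", "FROM", "WHERE", "ORDER BY", "LIMIT", "OFFSET")
--     matches: list[tuple[int, str]] = []
--     upper = text.upper()
--     in_single = False
--     in_double = False
--     depth = 0
--     idx = 0
--
--     while idx < len(text):
--         ch = text[idx]
--         if ch == "'" and not in_double: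
--             in_single = not in_single
--         elif ch == '"' and not in_single:
--             in_double = not in_double
--         elif not in_single and not in_double:
--             if ch in "([{":
--                 depth += 1
--             elif ch in ")]}":
--                 depth = max(0, depth - 1)
--
--             if depth == 0:
--                 for keyword in keywords:
--                     if upper.startswith(keyword, idx):
--                         before_ok = idx == 0 or not upper[idx - 1].isalnum()
--                         after_pos = idx + len(keyword)
--                         after_ok = after_pos >= len(upper) or not upper[after_pos].isalnum()
--                         if before_ok and after_ok:
--                             matches.append((idx, keyword))
--                             idx += len(keyword)
--                             break
--                 else:
--                     idx += 1
--                     continue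
--                 continue
--         idx += 1
--
--     return matches
-- ===== SOURCE B (Python) =====
-- def _scan_boundaries(text):
--     keywords = ("SELECT", "FROM", "WHERE", "ORDER BY", "LIMIT", "OFFSET")
--     upper = text.upper()
--     # pass 1: active[i] = True iff a keyword match may be attempted at i
--     # (outside quotes, not a quote char, bracket depth after char i is 0)
--     active = []
--     in_single = False
--     in_double = False
--     depth = 0
--     for ch in text:
--         if ch == "'" and not in_double:
--             in_single = not in_single
--             active.append(False)
--         elif ch == '"' and not in_single:
--             in_double = not in_double
--             active.append(False)
--         elif not in_single and not in_double:
--             if ch in "([{":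
--                 depth += 1
--             elif ch in ")]}":
--                 depth = max(0, depth - 1)
--             active.append(depth == 0)
--         else:
--             active.append(False)
--     # pass 2: test every active index; stepping by 1 is safe because no
--     # keyword can start strictly inside another boundary-checked match
--     matches = []
--     for idx in range(len(text)):
--         if not active[idx]:
--             continue
--         for keyword in keywords:
--             if upper.startswith(keyword, idx):
--                 before_ok = idx == 0 or not upper[idx - 1].isalnum()
--                 after_pos = idx + len(keyword)
--                 after_ok = after_pos >= len(upper) or not upper[after_pos].isalnum()
--                 if before_ok and after_ok:
--                     matches.append((idx, keyword))
--                     break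
--     return matches
-- ===== Notes on version B (the rewrite author's own statement) =====
-- stated objective: alternative
-- what changed: Replaced A's single skipping while-loop (quote/bracket state machine interleaved with keyword matching, jumping idx by the keyword length on a match) by two passes: pass 1 runs the state machine once to build a per-character boolean mask of match-eligible positions, pass 2 scans every index left to right, advancing by 1, testing keywords only at eligible indices; correctness relies on a proved lemma that no keyword can start strictly inside another boundary-checked match.
import Mathlib
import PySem

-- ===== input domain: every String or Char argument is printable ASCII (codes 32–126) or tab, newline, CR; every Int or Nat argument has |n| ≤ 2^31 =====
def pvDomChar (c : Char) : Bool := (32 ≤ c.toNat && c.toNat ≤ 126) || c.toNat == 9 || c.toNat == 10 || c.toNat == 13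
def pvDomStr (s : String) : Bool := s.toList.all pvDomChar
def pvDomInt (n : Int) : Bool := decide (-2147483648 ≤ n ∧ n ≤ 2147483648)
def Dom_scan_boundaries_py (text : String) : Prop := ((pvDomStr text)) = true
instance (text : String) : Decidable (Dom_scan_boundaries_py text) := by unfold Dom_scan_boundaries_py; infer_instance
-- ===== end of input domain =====

-- B replaces A's single skipping state-machine loop by two passes: first an
-- 'active' boolean mask from the quote/bracket state machine, then a left-to-right
-- keyword scan advancing one index at a time (alternative decomposition, same cost).

-- ===== PORT A =====
-- the keyword tuple (shared literal of both Pythons)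
def pvKws : List String := ["SELECT", "FROM", "WHERE", "ORDER BY", "LIMIT", "OFFSET"]

-- the identical inner `for keyword in keywords` loop of both Pythons:
-- upper.startswith(keyword, idx) plus the before_ok/after_ok isalnum boundary tests
-- (Chars.isalnum is exact for the ASCII domain; the idx==0 / after_pos>=len guards
--  make the Option-indexing `any` read exactly the characters Python reads)
def pvKwMatch (us : List Char) (idx : Nat) (k : String) : Bool :=
  PySem.Chars.startswith (us.drop idx) k.toList &&
  (decide (idx = 0) || !((us[idx - 1]?).any PySem.Chars.isalnum)) &&
  (decide (us.length ≤ idx + k.toList.length) || !((us[idx + k.toList.length]?).any PySem.Chars.isalnum))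

def pvFirstMatch (us : List Char) (idx : Nat) : Option String :=
  pvKws.find? (fun k => pvKwMatch us idx k)

-- A's while loop, step for step (depth - 1 on Nat is Python's max(0, depth-1));
-- the fuel argument (one unit per loop iteration, idx advances by at least 1)
-- only makes the recursion structural, it never cuts the computation short
def pvALoop : Nat → List Char → List Char → Bool → Bool → Nat → Nat → List (Int × String)
  | 0, _, _, _, _, _, _ => []
  | fuel + 1, cs, us, inS, inD, depth, idx =>
    if h : idx < cs.length then
      let ch := cs[idx]
      if ch = '\'' ∧ inD = false then pvALoop fuel cs us (!inS) inD depth (idx + 1)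
      else if ch = '"' ∧ inS = false then pvALoop fuel cs us inS (!inD) depth (idx + 1)
      else if inS = false ∧ inD = false then
        let depth' := if ch = '(' ∨ ch = '[' ∨ ch = '{' then depth + 1
                      else if ch = ')' ∨ ch = ']' ∨ ch = '}' then depth - 1
                      else depth
        if depth' = 0 then
          match pvFirstMatch us idx with
          | some k => ((idx : Int), k) :: pvALoop fuel cs us inS inD depth' (idx + k.toList.length)
          | none => pvALoop fuel cs us inS inD depth' (idx + 1)
        else pvALoop fuel cs us inS inD depth' (idx + 1)
      else pvALoop fuel cs us inS inD depth (idx + 1)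
    else []

def scan_boundaries_py (text : String) : List (Int × String) :=
  pvALoop text.toList.length text.toList (PySem.Chars.upper text.toList) false false 0 0

-- ===== PORT B =====
-- pass 1: the active mask (same state machine, emitting one Bool per character)
def pvMask : List Char → Bool → Bool → Nat → List Bool
  | [], _, _, _ => []
  | ch :: rest, inS, inD, depth =>
    if ch = '\'' ∧ inD = false then false :: pvMask rest (!inS) inD depth
    else if ch = '"' ∧ inS = false then false :: pvMask rest inS (!inD) depth
    else if inS = false ∧ inD = false then
      let depth' := if ch = '(' ∨ ch = '[' ∨ ch = '{' then depth + 1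
                    else if ch = ')' ∨ ch = ']' ∨ ch = '}' then depth - 1
                    else depth
      decide (depth' = 0) :: pvMask rest inS inD depth'
    else false :: pvMask rest inS inD depth

-- pass 2: `for idx in range(len(text))`, testing mask[idx] then the keywords
def pvBScan (us : List Char) : List Bool → Nat → List (Int × String)
  | [], _ => []
  | b :: rest, idx =>
    if b then
      match pvFirstMatch us idx with
      | some k => ((idx : Int), k) :: pvBScan us rest (idx + 1)
      | none => pvBScan us rest (idx + 1)
    else pvBScan us rest (idx + 1)

def scan_boundaries_py_alt (text : String) : List (Int × String) :=
  pvBScan (PySem.Chars.upper text.toList) (pvMask text.toList false false 0) 0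

-- ===== PRECONDITION & SPEC =====
def Spec_scan_boundaries_py (text : String) (out : List (Int × String)) : Prop := out = scan_boundaries_py_alt text
instance (text : String) (out : List (Int × String)) : Decidable (Spec_scan_boundaries_py text out) := by unfold Spec_scan_boundaries_py; infer_instance

-- ===== CLAIM (what is proved, stated in full; the proofs are below) =====
def Claim_equal_scan_boundaries_py : Prop := ∀ (text : String), Dom_scan_boundaries_py text → Spec_scan_boundaries_py text (scan_boundaries_py text)

-- ===== LEMMAS AND PROOFS =====

-- every keyword is nonempty
theorem pvKw_len_pos : ∀ k ∈ pvKws, 0 < k.toList.length := by decide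

-- no keyword character is a quote or bracket
-- the quote/bracket characters the state machine reacts to
def pvSpecials : List Char := ['\'', '"', '(', '[', '{', ')', ']', '}']

theorem pvKw_chars_plain_b : pvKws.all (fun k => k.toList.all (fun c => !(pvSpecials.contains c))) = true := by
  decide

theorem pvKw_char_plain : ∀ k ∈ pvKws, ∀ c ∈ k.toList, c ∉ pvSpecials := by
  intro k hk c hc
  have h1 := (List.all_eq_true.1 pvKw_chars_plain_b) k hk
  exact (by simpa using h1 : ∀ x ∈ k.toList, x ∉ pvSpecials) c hc

-- at each interior offset, either the previous keyword character is alphanumeric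
-- or the character at the offset is 'B' (the space in "ORDER BY")
theorem pvKw_interior : ∀ k ∈ pvKws,
    ∀ o < 9, 1 ≤ o → o < k.toList.length →
      PySem.Chars.isalnum (k.toList.getD (o - 1) ' ') = true ∨ k.toList.getD o ' ' = 'B' := by
  decide

-- no keyword begins with 'B'
theorem pvKw_no_B : ∀ k ∈ pvKws, k.toList.getD 0 ' ' ≠ 'B' := by decide

theorem pvKw_len_le8 : ∀ k ∈ pvKws, k.toList.length ≤ 8 := by decide

-- a match at idx gives the characters of us at offsets below the keyword length
theorem pvMatch_prefix {us : List Char} {idx : Nat} {k : String}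
    (hm : pvFirstMatch us idx = some k) :
    k.toList <+: us.drop idx := by
  have hp := List.find?_some hm
  simp only [pvKwMatch, Bool.and_eq_true] at hp
  exact (PySem.Chars.startswith_iff _ _).1 hp.1.1

theorem pvMatch_char {us : List Char} {idx : Nat} {k : String}
    (hm : pvFirstMatch us idx = some k) {o : Nat} (ho : o < k.toList.length) :
    us[idx + o]? = some (k.toList.getD o ' ') := by
  have hp := pvMatch_prefix hm
  have hlen : k.toList.length ≤ (us.drop idx).length := hp.length_le
  have hidx : idx + o < us.length := by
    simp only [List.length_drop] at hlen; omega
  have := hp.getElem (i := o) ho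
  rw [List.getElem_drop] at this
  rw [List.getElem?_eq_getElem hidx, List.getD_eq_getElem _ _ ho, this]

-- the crux: no keyword can match strictly inside a matched keyword
theorem pvNoInteriorMatch {us : List Char} {idx : Nat} {k : String}
    (hm : pvFirstMatch us idx = some k) {o : Nat} (h1 : 1 ≤ o) (h2 : o < k.toList.length) :
    pvFirstMatch us (idx + o) = none := by
  have hk : k ∈ pvKws := List.mem_of_find?_eq_some hm
  rcases pvKw_interior k hk o (lt_of_lt_of_le h2 (le_trans (pvKw_len_le8 k hk) (by omega))) h1 h2 with hal | hB
  · -- previous character is alphanumeric: before_ok is false for every keyword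
    refine List.find?_eq_none.2 (fun k' _ => ?_)
    have hprev : us[idx + o - 1]? = some (k.toList.getD (o - 1) ' ') := by
      have := pvMatch_char hm (o := o - 1) (by omega)
      rwa [show idx + (o - 1) = idx + o - 1 by omega] at this
    intro htrue
    simp only [pvKwMatch, Bool.and_eq_true, Bool.or_eq_true, decide_eq_true_eq,
      Bool.not_eq_true'] at htrue
    rcases htrue.1.2 with h0 | hany
    · omega
    · rw [hprev] at hany
      rw [List.getD_eq_getElem?_getD] at hal
      exact Bool.false_ne_true (hany.symm.trans hal)
  · -- character at the offset is 'B': no keyword starts with 'B'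
    refine List.find?_eq_none.2 (fun k' hk' => ?_)
    have hcur : us[idx + o]? = some 'B' := by rw [pvMatch_char hm h2, hB]
    intro htrue
    simp only [pvKwMatch, Bool.and_eq_true] at htrue
    have hp' := (PySem.Chars.startswith_iff _ _).1 htrue.1.1
    have hpos : 0 < k'.toList.length := pvKw_len_pos k' hk'
    have hfirst := hp'.getElem (i := 0) hpos
    rw [List.getElem_drop] at hfirst
    have hlen : k'.toList.length ≤ (us.drop (idx + o)).length := hp'.length_le
    have hrange : idx + o < us.length := by
      simp only [List.length_drop] at hlen; omega
    have hx : us[idx + o + 0]? = some (k'.toList[0]) := by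
      rw [List.getElem?_eq_getElem (by omega), hfirst]
    rw [Nat.add_zero, hcur] at hx
    have : k'.toList.getD 0 ' ' = 'B' := by
      rw [List.getD_eq_getElem _ _ hpos]
      exact Option.some.inj hx.symm
    exact pvKw_no_B k' hk' this

-- interior characters of a matched keyword leave the state machine unchanged and active
theorem pvMask_neutral {cs us : List Char} (hus : us = PySem.Chars.upper cs)
    {idx : Nat} {k : String} (hm : pvFirstMatch us idx = some k)
    {o : Nat} (ho : o < k.toList.length) (hr : idx + o < cs.length) :
    pvMask (cs.drop (idx + o)) false false 0
      = true :: pvMask (cs.drop (idx + o + 1)) false false 0 := by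
  have hk : k ∈ pvKws := List.mem_of_find?_eq_some hm
  have hchar := pvMatch_char hm ho
  have hup : PySem.Chars.upperChar cs[idx + o] = k.toList.getD o ' ' := by
    subst hus
    rw [PySem.Chars.upper, List.getElem?_map, List.getElem?_eq_getElem hr] at hchar
    exact Option.some.inj hchar
  have hmem : k.toList.getD o ' ' ∈ k.toList := by
    rw [List.getD_eq_getElem _ _ ho]; exact List.getElem_mem ho
  have hplain := pvKw_char_plain k hk _ hmem
  have hcs : cs[idx + o] ∉ pvSpecials := by
    intro hmem2
    apply hplain
    rw [← hup]
    simp only [pvSpecials, List.mem_cons, List.not_mem_nil, or_false] at hmem2 ⊢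
    rcases hmem2 with h|h|h|h|h|h|h|h <;> rw [h] <;> decide
  simp only [pvSpecials, List.mem_cons, List.not_mem_nil, or_false] at hcs
  push Not at hcs
  obtain ⟨h1, h2, h3, h4, h5, h6, h7, h8⟩ := hcs
  rw [← List.getElem_cons_drop hr]
  simp [pvMask, h1, h2, h3, h4, h5, h6, h7, h8]

-- skipping over the interior of a matched keyword changes nothing in B's scan
theorem pvSkip {cs us : List Char} (hus : us = PySem.Chars.upper cs)
    {idx : Nat} {k : String} (hm : pvFirstMatch us idx = some k) :
    ∀ d o, 1 ≤ o → o + d = k.toList.length →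
      pvBScan us (pvMask (cs.drop (idx + o)) false false 0) (idx + o)
        = pvBScan us (pvMask (cs.drop (idx + k.toList.length)) false false 0)
            (idx + k.toList.length) := by
  intro d
  induction d with
  | zero => intro o _ h2; rw [show o = k.toList.length by omega]
  | succ d ih =>
    intro o h1 h2
    have ho : o < k.toList.length := by omega
    have hr : idx + o < cs.length := by
      have hlen : k.toList.length ≤ (us.drop idx).length := (pvMatch_prefix hm).length_le
      have : us.length = cs.length := by subst hus; simp [PySem.Chars.upper]
      simp only [List.length_drop] at hlen; omega
    rw [pvMask_neutral hus hm ho hr]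
    simp only [pvBScan, pvNoInteriorMatch hm h1 ho]
    have := ih (o + 1) (by omega) (by omega)
    rwa [show idx + (o + 1) = idx + o + 1 by omega] at this

-- the main invariant: A's loop from any state equals B's scan of the suffix mask
theorem pvMain (cs us : List Char) (hus : us = PySem.Chars.upper cs) :
    ∀ fuel inS inD depth idx, cs.length - idx ≤ fuel →
      pvALoop fuel cs us inS inD depth idx
        = pvBScan us (pvMask (cs.drop idx) inS inD depth) idx := by
  intro fuel
  induction fuel with
  | zero =>
    intro inS inD depth idx hn
    rw [pvALoop, List.drop_eq_nil_of_le (by omega), pvMask, pvBScan]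
  | succ n ih =>
    intro inS inD depth idx hn
    rw [pvALoop]
    by_cases h : idx < cs.length
    · rw [dif_pos h, ← List.getElem_cons_drop h]
      simp only [pvMask]
      by_cases hq1 : cs[idx] = '\'' ∧ inD = false
      · rw [if_pos hq1, if_pos hq1, pvBScan, if_neg (by simp)]
        exact ih _ _ _ _ (by omega)
      · rw [if_neg hq1, if_neg hq1]
        by_cases hq2 : cs[idx] = '"' ∧ inS = false
        · rw [if_pos hq2, if_pos hq2, pvBScan, if_neg (by simp)]
          exact ih _ _ _ _ (by omega)
        · rw [if_neg hq2, if_neg hq2]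
          by_cases hq3 : inS = false ∧ inD = false
          · rw [if_pos hq3, if_pos hq3]
            obtain ⟨hS, hD⟩ := hq3
            subst hS; subst hD
            set depth' := (if cs[idx] = '(' ∨ cs[idx] = '[' ∨ cs[idx] = '{' then depth + 1
                           else if cs[idx] = ')' ∨ cs[idx] = ']' ∨ cs[idx] = '}' then depth - 1
                           else depth) with hdepth'
            by_cases hz : depth' = 0
            · rw [pvBScan]
              simp only [hz, decide_true, if_true]
              split
              · next k hfm =>
                have hk : k ∈ pvKws := List.mem_of_find?_eq_some hfm
                have hpos := pvKw_len_pos _ hk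
                have hskip := pvSkip hus hfm (k.toList.length - 1) 1 (by omega) (by omega)
                rw [ih false false 0 (idx + k.toList.length) (by omega), ← hskip]
              · next hfm =>
                rw [ih false false 0 (idx + 1) (by omega)]
            · rw [if_neg hz, pvBScan, if_neg (by simp [hz])]
              exact ih _ _ _ _ (by omega)
          · rw [if_neg hq3, if_neg hq3, pvBScan, if_neg (by simp)]
            exact ih _ _ _ _ (by omega)
    · rw [dif_neg h, List.drop_eq_nil_of_le (by omega), pvMask, pvBScan]

-- ===== VERDICT (by name: the statement is the Claim_ definition above) =====
theorem scan_boundaries_py_spec : Claim_equal_scan_boundaries_py := by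
  intro text _
  unfold Spec_scan_boundaries_py scan_boundaries_py scan_boundaries_py_alt
  rw [pvMain text.toList _ rfl text.toList.length false false 0 0 (by omega), List.drop_zero]
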